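-- pv_equiv track=rewrite | github.com/lavinal712/Introduction-to-Cryptography-2023Spring-USTC | SimpleSubstitutionCipher/simple_substitution_cipher.py | decrypt_with_cipherletter_mapping
-- ===== SOURCE A (Python) =====
-- def decrypt_with_cipherletter_mapping(ciphertext, letter_mapping):
--     translated_text = ""
--     for symbol in ciphertext:
--         if symbol.upper() in letter_mapping:
--             letter, weight = list(letter_mapping[symbol.upper()].items())[0]
--             if symbol.isupper():
--                 translated_text += letter
--             else:
--                 translated_text += letter.lower()
--         else:
--             translated_text += symbol
--
--     return translated_text
-- ===== SOURCE B (Python) =====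
-- def decrypt_with_cipherletter_mapping(ciphertext, letter_mapping):
--     table = {}
--     for c in set(ciphertext):
--         key = c.upper()
--         if key in letter_mapping:
--             letter = next(iter(letter_mapping[key]))
--             table[ord(c)] = letter if c.isupper() else letter.lower()
--     return ciphertext.translate(table)
-- ===== Notes on version B (the rewrite author's own statement) =====
-- stated objective: alternative
-- what changed: Replaced the per-character string-accumulation loop with a translation table precomputed once over the distinct characters of the ciphertext and applied in a single str.translate pass.
import Mathlib
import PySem

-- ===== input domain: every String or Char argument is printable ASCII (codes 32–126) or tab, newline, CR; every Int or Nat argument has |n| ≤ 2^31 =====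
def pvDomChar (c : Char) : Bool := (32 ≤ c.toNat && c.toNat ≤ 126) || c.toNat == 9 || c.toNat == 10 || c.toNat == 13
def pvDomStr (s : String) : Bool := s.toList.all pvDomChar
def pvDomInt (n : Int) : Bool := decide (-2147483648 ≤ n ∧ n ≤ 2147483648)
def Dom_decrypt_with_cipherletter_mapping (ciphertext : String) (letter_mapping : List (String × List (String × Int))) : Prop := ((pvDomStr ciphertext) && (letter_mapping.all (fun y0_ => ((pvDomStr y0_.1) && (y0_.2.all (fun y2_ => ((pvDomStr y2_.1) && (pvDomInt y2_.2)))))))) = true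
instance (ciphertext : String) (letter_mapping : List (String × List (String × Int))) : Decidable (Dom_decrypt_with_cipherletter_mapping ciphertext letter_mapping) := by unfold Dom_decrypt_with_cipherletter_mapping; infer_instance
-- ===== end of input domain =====

-- B replaces A's per-character accumulation loop by a translation table built once over the distinct
-- characters of the ciphertext and applied in a single str.translate pass (objective: alternative).


-- ===== PORT A =====
-- A: for each symbol, look up symbol.upper() in the mapping (first match, string ==); if present take the
-- first inner item's key, append it (lower-cased unless symbol.isupper()); else append the symbol.
-- symbol.isupper() on a one-character ASCII string is PySem.Chars.isupper of the character.
-- On the branch where Python raises IndexError (first-matching inner dict empty) the port returns acc; Pre_ excludes it.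
def decrypt_with_cipherletter_mapping (ciphertext : String) (letter_mapping : List (String × List (String × Int))) : String :=
  String.ofList <| ciphertext.toList.foldl (fun acc symbol =>
    match letter_mapping.find? (fun p => p.1.toList == PySem.Chars.upper [symbol]) with
    | some (_, (letter, _) :: _) =>
        if PySem.Chars.isupper symbol then acc ++ letter.toList
        else acc ++ PySem.Chars.lower letter.toList
    | some (_, []) => acc  -- Python: IndexError (outside Pre_)
    | none => acc ++ [symbol]) []

-- ===== PORT B =====
-- the loop body building the table (Source B's for-loop over set(ciphertext))
def pvStep_decrypt (letter_mapping : List (String × List (String × Int)))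
    (t : PySem.Dict Char (List Char)) (c : Char) : PySem.Dict Char (List Char) :=
  match letter_mapping.find? (fun p => p.1.toList == PySem.Chars.upper [c]) with
  | some (_, (letter, _) :: _) =>
      t.insert c (if PySem.Chars.isupper c then letter.toList else PySem.Chars.lower letter.toList)
  | _ => t  -- key absent: no entry; inner empty: Python raises StopIteration (outside Pre_)

def pvTable_decrypt (ciphertext : String) (letter_mapping : List (String × List (String × Int))) : PySem.Dict Char (List Char) :=
  (PySem.Set.ofList ciphertext.toList).foldl (pvStep_decrypt letter_mapping) PySem.Dict.empty

-- ciphertext.translate(table): mapped characters expand to their replacement, others pass through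
def decrypt_with_cipherletter_mapping_alt (ciphertext : String) (letter_mapping : List (String × List (String × Int))) : String :=
  String.ofList <| ciphertext.toList.flatMap (fun c =>
    match (pvTable_decrypt ciphertext letter_mapping).get? c with
    | some r => r
    | none => [c])

-- ===== PRECONDITION & SPEC =====
-- Pre_ excludes exactly the inputs on which A raises IndexError (and B StopIteration): some ciphertext
-- character whose upper-cased key is present in the mapping but whose first-matching inner dict is empty.
def Pre_decrypt_with_cipherletter_mapping (ciphertext : String) (letter_mapping : List (String × List (String × Int))) : Prop :=
  (ciphertext.toList.all (fun c =>
    (letter_mapping.find? (fun p => p.1.toList == PySem.Chars.upper [c])).all (fun p => !p.2.isEmpty))) = true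
instance (ciphertext : String) (letter_mapping : List (String × List (String × Int))) : Decidable (Pre_decrypt_with_cipherletter_mapping ciphertext letter_mapping) := by unfold Pre_decrypt_with_cipherletter_mapping; infer_instance

def pvWitness_decrypt_with_cipherletter_mapping : String × (List (String × List (String × Int))) :=
  ("Ab c!", [("A", [("X", 1), ("Y", 2)]), ("B", [("Z", 3)])])

def Spec_decrypt_with_cipherletter_mapping (ciphertext : String) (letter_mapping : List (String × List (String × Int))) (out : String) : Prop := out = decrypt_with_cipherletter_mapping_alt ciphertext letter_mapping
instance (ciphertext : String) (letter_mapping : List (String × List (String × Int))) (out : String) : Decidable (Spec_decrypt_with_cipherletter_mapping ciphertext letter_mapping out) := by unfold Spec_decrypt_with_cipherletter_mapping; infer_instance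

-- ===== CLAIM (what is proved, stated in full; the proofs are below) =====
def Claim_equal_decrypt_with_cipherletter_mapping : Prop := ∀ (ciphertext : String) (letter_mapping : List (String × List (String × Int))), Dom_decrypt_with_cipherletter_mapping ciphertext letter_mapping → Pre_decrypt_with_cipherletter_mapping ciphertext letter_mapping → Spec_decrypt_with_cipherletter_mapping ciphertext letter_mapping (decrypt_with_cipherletter_mapping ciphertext letter_mapping)

-- ===== LEMMAS AND PROOFS =====

-- the per-character replacement both programs compute, as an Option (none = key absent or inner empty)
def pvRepl? (letter_mapping : List (String × List (String × Int))) (c : Char) : Option (List Char) :=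
  match letter_mapping.find? (fun p => p.1.toList == PySem.Chars.upper [c]) with
  | some (_, (letter, _) :: _) =>
      some (if PySem.Chars.isupper c then letter.toList else PySem.Chars.lower letter.toList)
  | _ => none

lemma pvStep_eq (lm : List (String × List (String × Int))) (t : PySem.Dict Char (List Char)) (c : Char) :
    pvStep_decrypt lm t c = match pvRepl? lm c with
      | some r => t.insert c r
      | none => t := by
  unfold pvStep_decrypt pvRepl?
  rcases h : lm.find? (fun p => p.1.toList == PySem.Chars.upper [c]) with _ | ⟨k, _ | ⟨⟨l, w⟩, rest⟩⟩ <;> simp [h]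

lemma pvTable_get_not_mem (lm : List (String × List (String × Int))) (L : List Char)
    (t : PySem.Dict Char (List Char)) (c : Char) (hc : c ∉ L) :
    (L.foldl (pvStep_decrypt lm) t).get? c = t.get? c := by
  induction L generalizing t with
  | nil => rfl
  | cons x L ih =>
    simp only [List.mem_cons, not_or] at hc
    rw [List.foldl_cons, ih _ hc.2, pvStep_eq]
    rcases pvRepl? lm x with _ | r
    · rfl
    · exact PySem.Dict.get?_insert_of_ne _ _ hc.1

lemma pvTable_get_mem (lm : List (String × List (String × Int))) (L : List Char)
    (t : PySem.Dict Char (List Char)) (c : Char) (hnd : L.Nodup) (hc : c ∈ L) :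
    (L.foldl (pvStep_decrypt lm) t).get? c = match pvRepl? lm c with
      | some r => some r
      | none => t.get? c := by
  induction L generalizing t with
  | nil => cases hc
  | cons x L ih =>
    rw [List.nodup_cons] at hnd
    rw [List.foldl_cons]
    rcases List.mem_cons.1 hc with hcx | hcL
    · subst hcx
      rw [pvTable_get_not_mem lm L _ c hnd.1, pvStep_eq]
      rcases pvRepl? lm c with _ | r
      · rfl
      · exact PySem.Dict.get?_insert_self _ _ _
    · rw [ih _ hnd.2 hcL]
      have hxc : x ≠ c := fun h => hnd.1 (h ▸ hcL)
      rcases hr : pvRepl? lm c with _ | r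
      · rw [pvStep_eq]
        rcases pvRepl? lm x with _ | r'
        · rfl
        · exact PySem.Dict.get?_insert_of_ne _ _ (Ne.symm hxc)
      · rfl

-- B's per-character output equals A's per-character output on every character of the ciphertext
lemma pvLookup_eq (ct : String) (lm : List (String × List (String × Int))) (c : Char)
    (hc : c ∈ ct.toList) :
    (pvTable_decrypt ct lm).get? c = pvRepl? lm c := by
  unfold pvTable_decrypt
  rw [pvTable_get_mem lm _ _ c (PySem.Set.nodup_ofList _) ((PySem.Set.mem_ofList _ _).2 hc)]
  rcases pvRepl? lm c with _ | r <;> rfl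

theorem pv_main (ct : String) (lm : List (String × List (String × Int)))
    (hpre : Pre_decrypt_with_cipherletter_mapping ct lm) :
    decrypt_with_cipherletter_mapping ct lm = decrypt_with_cipherletter_mapping_alt ct lm := by
  unfold decrypt_with_cipherletter_mapping decrypt_with_cipherletter_mapping_alt
  congr 1
  rw [PySem.List.foldl_congr_mem ct.toList _ (fun acc c => acc ++ (match pvRepl? lm c with
        | some r => r
        | none => [c])) [] ?body]
  · rw [PySem.List.foldl_append_eq_flatMap, List.nil_append]
    exact List.flatMap_congr (fun c hc => by rw [pvLookup_eq ct lm c hc])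
  case body =>
    intro acc c hc
    unfold Pre_decrypt_with_cipherletter_mapping at hpre
    rw [List.all_eq_true] at hpre
    have h := hpre c hc
    simp only [pvRepl?]
    rcases hf : lm.find? (fun p => p.1.toList == PySem.Chars.upper [c]) with _ | ⟨k, _ | ⟨⟨l, w⟩, rest⟩⟩
    · simp [hf]
    · rw [hf] at h; simp at h
    · simp only [hf]; split <;> simp

-- ===== VERDICT (by name: the statement is the Claim_ definition above) =====
theorem decrypt_with_cipherletter_mapping_spec : Claim_equal_decrypt_with_cipherletter_mapping := by
  intro ct lm _ hpre
  unfold Spec_decrypt_with_cipherletter_mapping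
  exact pv_main ct lm hpre
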